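-- pv_equiv track=rewrite | github.com/rkawkclzls/pyalgo-100 | 100/27.py | solution
-- ===== SOURCE A (Python) =====
-- def solution(data):
--     data,s = data
--     new_data = data * 2
--     for i in range(len(data)):
--         if (i + 1) ==  1:
--             for j in data:
--                 if j == s:
--                     return (i + 1)
--         else:
--             for k in range(len(new_data)):
--                 if s == sum(new_data[k:k+i+1]):
--                     return (i + 1)
--     return 0
-- ===== SOURCE B (Python) =====
-- def solution(data):
--     arr, s = data
--     doubled = arr + arr
--     m = len(doubled)
--     pre = [0]
--     for v in doubled:
--         pre.append(pre[-1] + v)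
--     for L in range(1, len(arr) + 1):
--         for k in range(m):
--             if pre[min(k + L, m)] - pre[k] == s:
--                 return L
--     return 0
-- ===== Notes on version B (the rewrite author's own statement) =====
-- stated objective: faster
-- what changed: B precomputes one prefix-sum array of the doubled list and tests each (clamped) window sum by a subtraction, replacing A's per-window sum() of a slice and its special-cased length-1 pass.
import Mathlib
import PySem

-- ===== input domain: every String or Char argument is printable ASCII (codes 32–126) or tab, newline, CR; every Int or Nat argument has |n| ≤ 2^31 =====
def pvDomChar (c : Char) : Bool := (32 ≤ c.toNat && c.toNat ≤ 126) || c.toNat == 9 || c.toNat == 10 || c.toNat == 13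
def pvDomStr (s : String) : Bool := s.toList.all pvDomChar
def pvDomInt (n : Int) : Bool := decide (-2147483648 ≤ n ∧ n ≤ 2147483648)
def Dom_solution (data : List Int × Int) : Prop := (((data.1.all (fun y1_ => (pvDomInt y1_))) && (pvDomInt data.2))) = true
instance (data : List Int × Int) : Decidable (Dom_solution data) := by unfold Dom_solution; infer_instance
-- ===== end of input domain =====

-- B replaces A's per-window sum() over slices (and A's special-cased length-1 pass)
-- by one prefix-sum array of the doubled list with O(1) clamped window sums: O(n^2) vs O(n^3).

-- ===== PORT A =====
def solution (data : List Int × Int) : Int :=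
  let d := data.1
  let s := data.2
  let nd := d ++ d
  match (PySem.List.pyRange 0 d.length 1).findSome? (fun i =>
      if i + 1 = 1 then
        (if d.any (fun j => j == s) then some (i + 1) else none)
      else
        (if (PySem.List.pyRange 0 nd.length 1).any (fun k =>
            s == (PySem.List.slice nd (some k) (some (k + i + 1))).sum)
         then some (i + 1) else none)) with
  | some r => r
  | none => 0

-- ===== PORT B =====
-- running prefix sums: preAux xs acc = tail of the Python 'pre' list after the append loop
def preAux : List Int → Int → List Int
  | [], _ => []
  | v :: t, acc => (acc + v) :: preAux t (acc + v)

def solution_alt (data : List Int × Int) : Int :=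
  let arr := data.1
  let s := data.2
  let doubled := arr ++ arr
  let m : Int := doubled.length
  let pre := 0 :: preAux doubled 0
  match (PySem.List.pyRange 1 ((arr.length : Int) + 1) 1).findSome? (fun L =>
      if (PySem.List.pyRange 0 m 1).any (fun k =>
          PySem.List.pyGetD pre (min (k + L) m) 0 - PySem.List.pyGetD pre k 0 == s)
      then some L else none) with
  | some r => r
  | none => 0

-- ===== PRECONDITION & SPEC =====
def Spec_solution (data : List Int × Int) (out : Int) : Prop := out = solution_alt data
instance (data : List Int × Int) (out : Int) : Decidable (Spec_solution data out) := by unfold Spec_solution; infer_instance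

-- ===== CLAIM (what is proved, stated in full; the proofs are below) =====
def Claim_equal_solution : Prop := ∀ (data : List Int × Int), Dom_solution data → Spec_solution data (solution data)

-- ===== LEMMAS AND PROOFS =====

-- pre[j] (j ≤ |xs|) is the sum of the first j elements
theorem preAux_getD (xs : List Int) (acc : Int) (j : Nat) (hj : j < xs.length) :
    (preAux xs acc).getD j 0 = acc + (xs.take (j + 1)).sum := by
  induction xs generalizing acc j with
  | nil => simp at hj
  | cons v t ih =>
    cases j with
    | zero => simp [preAux]
    | succ j' =>
      simp only [preAux, List.getD_cons_succ, List.take_succ_cons, List.sum_cons]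
      rw [ih (acc + v) j' (by simpa using hj)]
      ring

theorem pre_getD (xs : List Int) (j : Nat) (hj : j ≤ xs.length) :
    (0 :: preAux xs 0).getD j 0 = (xs.take j).sum := by
  cases j with
  | zero => simp
  | succ j' =>
    simp only [List.getD_cons_succ]
    rw [preAux_getD xs 0 j' (by omega)]
    simp

theorem sum_take_sub (xs : List Int) (a b : Nat) :
    ((xs.drop a).take b).sum = (xs.take (a + b)).sum - (xs.take a).sum := by
  rw [List.take_add, List.sum_append]; ring

theorem take_min (xs : List Int) (j : Nat) :
    xs.take (min j xs.length) = xs.take j := by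
  rcases Nat.le_total j xs.length with h | h
  · rw [Nat.min_eq_left h]
  · rw [Nat.min_eq_right h, List.take_of_length_le (le_refl _), List.take_of_length_le h]

-- window sum via prefix sums, for 0 ≤ k < |nd| and 0 ≤ L
theorem window_sum (nd : List Int) (k L : Int) (hk : 0 ≤ k) (hk2 : k < (nd.length : Int)) (hL : 0 ≤ L) :
    PySem.List.pyGetD (0 :: preAux nd 0) (min (k + L) (nd.length : Int)) 0
      - PySem.List.pyGetD (0 :: preAux nd 0) k 0
      = (PySem.List.slice nd (some k) (some (k + L))).sum := by
  have hmin : min (k + L) (nd.length : Int) = ((min (k + L).toNat nd.length : Nat) : Int) := by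
    omega
  rw [hmin]
  obtain ⟨kn, rfl⟩ : ∃ kn : Nat, k = (kn : Int) := ⟨k.toNat, by omega⟩
  rw [PySem.List.pyGetD_natCast, PySem.List.pyGetD_natCast]
  rw [PySem.List.slice_toNat nd hk (by omega)]
  rw [pre_getD nd _ (Nat.min_le_right _ _)]
  rw [pre_getD nd kn (by exact_mod_cast le_of_lt hk2)]
  rw [take_min, Int.toNat_natCast, sum_take_sub]
  have : kn + (((kn : Int) + L).toNat - kn) = ((kn : Int) + L).toNat := by omega
  rw [this]

-- pointwise-equal predicates (on members) give equal List.any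
theorem anyCongrMem {α : Type} (l : List α) (f g : α → Bool) (h : ∀ x ∈ l, f x = g x) :
    l.any f = l.any g := by
  induction l with
  | nil => rfl
  | cons a t ih =>
    simp only [List.any_cons, h a List.mem_cons_self,
      ih (fun x hx => h x (List.mem_cons_of_mem a hx))]

-- a length-1 clamped window matches s iff some element of d equals s
theorem cond_one (d : List Int) (s : Int) :
    ((PySem.List.pyRange 0 (((d ++ d).length : Int)) 1).any (fun kk =>
        PySem.List.pyGetD (0 :: preAux (d ++ d) 0) (min (kk + 1) (((d ++ d).length : Int))) 0
          - PySem.List.pyGetD (0 :: preAux (d ++ d) 0) kk 0 == s))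
    = d.any (fun j => j == s) := by
  rw [Bool.eq_iff_iff]
  simp only [List.any_eq_true, PySem.List.mem_pyRange_one, beq_iff_eq]
  constructor
  · rintro ⟨kk, ⟨h0, hlt⟩, heq⟩
    rw [window_sum _ _ _ h0 hlt (by norm_num)] at heq
    have hx : (PySem.List.slice (d ++ d) (some kk) (some (kk + 1))).sum ∈ d ++ d := by
      obtain ⟨kn, rfl⟩ : ∃ kn : Nat, kk = (kn : Int) := ⟨kk.toNat, by omega⟩
      have hkn : kn < (d ++ d).length := by exact_mod_cast hlt
      rw [PySem.List.slice_toNat _ h0 (by omega)]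
      simp only [Int.toNat_natCast]
      have : ((kn : Int) + 1).toNat - kn = 1 := by omega
      rw [this, List.drop_eq_getElem_cons hkn]
      simp only [List.take_succ_cons, List.take_zero, List.sum_cons, List.sum_nil, add_zero]
      exact List.getElem_mem hkn
    rw [heq] at hx
    rcases List.mem_append.mp hx with h | h
    · exact ⟨s, h, rfl⟩
    · exact ⟨s, h, rfl⟩
  · rintro ⟨j, hj, rfl⟩
    obtain ⟨n, hn, hjn⟩ := List.mem_iff_getElem.mp hj
    refine ⟨(n : Int), ⟨by positivity, by simp; omega⟩, ?_⟩
    rw [window_sum _ _ _ (by positivity) (by simp; omega) (by norm_num)]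
    have hnd : n < (d ++ d).length := by simp; omega
    rw [PySem.List.slice_toNat _ (by positivity) (by positivity)]
    simp only [Int.toNat_natCast]
    have h1 : ((n : Int) + 1).toNat - n = 1 := by omega
    rw [h1, List.drop_eq_getElem_cons hnd]
    simp only [List.take_succ_cons, List.take_zero, List.sum_cons, List.sum_nil, add_zero]
    rw [List.getElem_append_left hn, hjn]

-- for a fixed window length L ≥ 0, B's prefix-sum test equals A's slice-sum test
theorem cond_eq (nd : List Int) (s L : Int) (hL : 0 ≤ L) :
    ((PySem.List.pyRange 0 ((nd.length : Int)) 1).any (fun kk =>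
        PySem.List.pyGetD (0 :: preAux nd 0) (min (kk + L) ((nd.length : Int))) 0
          - PySem.List.pyGetD (0 :: preAux nd 0) kk 0 == s))
    = ((PySem.List.pyRange 0 ((nd.length : Int)) 1).any (fun kk =>
        s == (PySem.List.slice nd (some kk) (some (kk + L))).sum)) := by
  apply anyCongrMem
  intro kk hkk
  obtain ⟨h0, hlt⟩ := (PySem.List.mem_pyRange_one).mp hkk
  rw [window_sum nd kk L h0 hlt hL, Bool.eq_iff_iff]
  simp only [beq_iff_eq]
  exact eq_comm

-- ===== VERDICT (by name: the statement is the Claim_ definition above) =====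
theorem solution_spec : Claim_equal_solution := by
  intro data _
  obtain ⟨d, s⟩ := data
  show solution (d, s) = solution_alt (d, s)
  simp only [solution, solution_alt]
  rw [PySem.List.pyRange_one 0 ((d.length : Int)), PySem.List.pyRange_one 1 ((d.length : Int) + 1)]
  simp only [sub_zero, add_sub_cancel_right, Int.toNat_natCast]
  rw [List.findSome?_map, List.findSome?_map]
  have hfun : ∀ (k : Nat),
      (Function.comp (fun i =>
        if i + 1 = 1 then
          (if d.any (fun j => j == s) then some (i + 1) else none)
        else
          (if (PySem.List.pyRange 0 (((d ++ d).length : Int)) 1).any (fun k =>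
              s == (PySem.List.slice (d ++ d) (some k) (some (k + i + 1))).sum)
           then some (i + 1) else none)) (fun k : Nat => (0 : Int) + k)) k
      = (Function.comp (fun L =>
          if (PySem.List.pyRange 0 (((d ++ d).length : Int)) 1).any (fun k =>
              PySem.List.pyGetD (0 :: preAux (d ++ d) 0) (min (k + L) (((d ++ d).length : Int))) 0
                - PySem.List.pyGetD (0 :: preAux (d ++ d) 0) k 0 == s)
          then some L else none) (fun k : Nat => (1 : Int) + k)) k := by
    intro k
    simp only [Function.comp_apply, zero_add]
    by_cases hk : k = 0
    · subst hk
      simp only [Nat.cast_zero, zero_add, add_zero]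
      rw [if_pos trivial, cond_one d s]
    · rw [if_neg (by omega)]
      have hv : ((k : Int)) + 1 = 1 + k := by ring
      have hb : (fun kk : Int => s == (PySem.List.slice (d ++ d) (some kk) (some (kk + k + 1))).sum)
          = (fun kk : Int => s == (PySem.List.slice (d ++ d) (some kk) (some (kk + (1 + k)))).sum) := by
        funext kk
        have : kk + (k : Int) + 1 = kk + (1 + k) := by ring
        rw [this]
      rw [hv, hb, ← cond_eq (d ++ d) s (1 + (k : Int)) (by positivity)]
  rw [funext hfun]
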